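-- pv_equiv track=rewrite | github.com/uw-bionlp/CACER | evaluation/evaluate.py | match_entities
-- ===== SOURCE A (Python) =====
-- def match_entities(text, tokens):
--     result=[]
--     if text in tokens:
--         return [(tokens.index(text),tokens.index(text)+1)]
--     for start_idx,tok in enumerate(tokens):
--         if tok==text[:len(tok)]:
--             temp_text=tok+''
--             for end_idx,tok2 in enumerate(tokens[start_idx+1:]):
--                 temp_text+=' '+tok2
--                 if temp_text==text:
--                     end_idx+=start_idx+1
--                     result.append((start_idx,end_idx+1))
--                 if temp_text not in text:
--                     break
--     return result
-- ===== SOURCE B (Python) =====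
-- def match_entities(text, tokens):
--     # Alternative algorithm: a prefix-length table + hash lookup find the unique
--     # candidate end index for each start; one join comparison per candidate.
--     if text in tokens:
--         i = tokens.index(text)
--         return [(i, i + 1)]
--     P = [0]
--     for t in tokens:
--         P.append(P[-1] + len(t) + 1)
--     idx = {p: i for i, p in enumerate(P)}
--     L = len(text)
--     result = []
--     for s in range(len(tokens)):
--         e = idx.get(P[s] + L + 1)
--         if e is not None and ' '.join(tokens[s:e]) == text:
--             result.append((s, e))
--     return result
-- ===== Notes on version B (the rewrite author's own statement) =====
-- stated objective: alternative
-- what changed: A grows a candidate string token by token for every start index and repeatedly substring-searches it in the text; B instead builds a prefix-length table and a hash map from prefix lengths to token boundaries once, so each start index gets its unique candidate end index by one dict lookup plus a single join comparison.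
import Mathlib
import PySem

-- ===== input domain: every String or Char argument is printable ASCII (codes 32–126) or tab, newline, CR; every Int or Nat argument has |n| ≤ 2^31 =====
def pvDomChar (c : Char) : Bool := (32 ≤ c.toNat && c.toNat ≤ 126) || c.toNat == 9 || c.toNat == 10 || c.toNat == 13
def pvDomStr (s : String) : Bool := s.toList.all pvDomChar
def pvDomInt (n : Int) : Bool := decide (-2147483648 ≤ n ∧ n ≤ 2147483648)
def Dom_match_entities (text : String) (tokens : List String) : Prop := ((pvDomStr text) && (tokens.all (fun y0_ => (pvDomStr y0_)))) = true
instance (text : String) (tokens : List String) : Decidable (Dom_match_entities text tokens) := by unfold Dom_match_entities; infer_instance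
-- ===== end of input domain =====

-- B replaces A's grow-and-substring-check inner loop by a prefix-length table and
-- a hash lookup of the unique candidate end index, with one join comparison per
-- candidate start (objective: alternative).

-- ===== PORT A =====
-- Both ports work on code points: strings become List Char at entry (PySem.Chars functions are the definitions of the PySem.Str ones).
-- inner loop: for end_idx,tok2 in enumerate(tokens[start_idx+1:]) with break
def pvInnerA (text : List Char) (startIdx : Int) : List (List Char) → Int → List Char → List (Int × Int) → List (Int × Int)
  | [], _, _, result => result
  | tok2 :: rest, endIdx, tempText, result =>
    let tempText := tempText ++ ' ' :: tok2                                     -- temp_text += ' ' + tok2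
    let result := if tempText = text then
        result ++ [(startIdx, (endIdx + startIdx + 1) + 1)]                     -- end_idx += start_idx+1; result.append((start_idx, end_idx+1))
      else result
    if PySem.Chars.isIn tempText text = false then result                       -- if temp_text not in text: break
    else pvInnerA text startIdx rest (endIdx + 1) tempText result

def match_entities (text : String) (tokens : List String) : List (Int × Int) :=
  let textL := text.toList
  let toks := tokens.map String.toList
  match PySem.List.index? toks textL with                                       -- if text in tokens: return [(tokens.index(text), tokens.index(text)+1)]
  | some i => [((i : Int), (i : Int) + 1)]
  | none =>
    (PySem.List.enumerate toks).foldl (fun result p =>                          -- for start_idx,tok in enumerate(tokens)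
      if p.2 = PySem.Chars.slice textL none (some ((p.2.length : Int))) then    -- if tok == text[:len(tok)]
        pvInnerA textL p.1 (PySem.List.slice toks (some (p.1 + 1)) none)        -- tokens[start_idx+1:]
          0 (p.2 ++ []) result                                                  -- temp_text = tok + ''
      else result) []

-- ===== PORT B =====
def pvPrefixLens (toks : List (List Char)) : List Int :=                        -- P[i] = len of first i tokens, each counted with its separator
  toks.foldl (fun P t => P ++ [P.getLast! + (t.length : Int) + 1]) [0]

def pvScanB (text : List Char) (toks : List (List Char)) : List (Int × Int) :=
  let P := pvPrefixLens toks
  let idx := (PySem.List.enumerate P).foldl                                     -- idx = {p: i for i,p in enumerate(P)}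
    (fun d p => PySem.Dict.insert d p.2 p.1) (PySem.Dict.mk [])
  let L : Int := (text.length : Int)
  (PySem.List.pyRange 0 (toks.length : Int)).foldl (fun result s =>             -- for s in range(len(tokens))
    match PySem.Dict.get? idx (PySem.List.pyGetD P s 0 + L + 1) with            -- e = idx.get(P[s] + L + 1)
    | some e =>
        if PySem.Chars.join [' '] (PySem.List.slice toks (some s) (some e)) = text  -- ' '.join(tokens[s:e]) == text
        then result ++ [(s, e)] else result
    | none => result) []

def match_entities_alt (text : String) (tokens : List String) : List (Int × Int) :=
  let textL := text.toList
  let toks := tokens.map String.toList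
  match PySem.List.index? toks textL with                                       -- if text in tokens: return [(i, i+1)]
  | some i => [((i : Int), (i : Int) + 1)]
  | none => pvScanB textL toks

-- ===== PRECONDITION & SPEC =====
def Spec_match_entities (text : String) (tokens : List String) (out : List (Int × Int)) : Prop := out = match_entities_alt text tokens
instance (text : String) (tokens : List String) (out : List (Int × Int)) : Decidable (Spec_match_entities text tokens out) := by unfold Spec_match_entities; infer_instance

-- ===== CLAIM (what is proved, stated in full; the proofs are below) =====
def Claim_equal_match_entities : Prop := ∀ (text : String) (tokens : List String), Dom_match_entities text tokens → Spec_match_entities text tokens (match_entities text tokens)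

-- ===== LEMMAS AND PROOFS =====

-- join of the tokens after a start token, each preceded by one space
def pvSepJoin (l : List (List Char)) : List Char := (l.map (fun t => ' ' :: t)).flatten

-- prefix sums: total length of the first i tokens, one separator charged per token
def pvS (toks : List (List Char)) (i : Nat) : Nat := ((toks.take i).map (fun t => t.length + 1)).sum

theorem pvInnerA_append (text : List Char) (s : Int) :
    ∀ (rest : List (List Char)) (k : Int) (temp : List Char) (acc : List (Int × Int)),
    pvInnerA text s rest k temp acc = acc ++ pvInnerA text s rest k temp [] := by
  intro rest
  induction rest with
  | nil => intro k temp acc; simp [pvInnerA]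
  | cons t rest ih =>
    intro k temp acc
    simp only [pvInnerA]
    by_cases h1 : temp ++ ' ' :: t = text
    · simp only [if_pos h1]
      by_cases h2 : PySem.Chars.isIn (temp ++ ' ' :: t) text = false
      · simp only [if_pos h2]; simp
      · simp only [if_neg h2]
        rw [ih (k + 1) (temp ++ ' ' :: t) (acc ++ [(s, k + s + 1 + 1)]),
            ih (k + 1) (temp ++ ' ' :: t) ([] ++ [(s, k + s + 1 + 1)])]
        simp
    · simp only [if_neg h1]
      by_cases h2 : PySem.Chars.isIn (temp ++ ' ' :: t) text = false
      · simp only [if_pos h2]; simp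
      · simp only [if_neg h2]
        exact ih (k + 1) (temp ++ ' ' :: t) acc

theorem pv_not_append_eq (u text : List Char) (h : ¬ u <:+: text) : ∀ v, u ++ v ≠ text := by
  intro v hv
  exact h (hv ▸ (List.prefix_append u v).isInfix)

theorem pvInnerA_nil_of_le (text : List Char) (s : Int) :
    ∀ (rest : List (List Char)) (k : Int) (temp : List Char),
    text.length ≤ temp.length → pvInnerA text s rest k temp [] = [] := by
  intro rest
  induction rest with
  | nil => intro k temp _; simp [pvInnerA]
  | cons t rest ih =>
    intro k temp hle
    have hne : ¬ (temp ++ ' ' :: t = text) := by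
      intro he
      have := congrArg List.length he
      simp [List.length_append] at this
      omega
    have hle' : text.length ≤ (temp ++ ' ' :: t).length := by
      simp [List.length_append]; omega
    simp only [pvInnerA, if_neg hne]
    split
    · rfl
    · exact ih (k + 1) (temp ++ ' ' :: t) hle'

theorem pvInnerA_eq (text : List Char) (s : Int) :
    ∀ (rest : List (List Char)) (k : Int) (temp : List Char),
    pvInnerA text s rest k temp [] =
      match (List.range rest.length).find?
          (fun j => temp ++ pvSepJoin (rest.take (j + 1)) == text) with
      | some j => [(s, (k + (j : Int) + s + 1) + 1)]
      | none => [] := by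
  intro rest
  induction rest with
  | nil => intro k temp; simp [pvInnerA]
  | cons t rest ih =>
    intro k temp
    have hsep : ∀ j : Nat, temp ++ pvSepJoin ((t :: rest).take (j + 1))
        = (temp ++ ' ' :: t) ++ pvSepJoin (rest.take j) := by
      intro j
      simp [pvSepJoin, List.take_succ_cons]
    by_cases h1 : temp ++ ' ' :: t = text
    · have hp0 : (fun j : Nat => temp ++ pvSepJoin ((t :: rest).take (j + 1)) == text) 0 = true := by
        simp [pvSepJoin, h1]
      have hfind : (List.range (t :: rest).length).find?
          (fun j => temp ++ pvSepJoin ((t :: rest).take (j + 1)) == text) = some 0 := by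
        rw [List.length_cons, List.range_succ_eq_map]
        exact List.find?_cons_of_pos hp0
      rw [hfind]
      have hisin : PySem.Chars.isIn (temp ++ ' ' :: t) text = true := by
        rw [PySem.Chars.isIn_iff_infix, h1]
      simp only [pvInnerA, if_pos h1, hisin]
      rw [pvInnerA_append, pvInnerA_nil_of_le text s rest (k + 1) (temp ++ ' ' :: t) (by rw [h1])]
      simp
    · have hp0 : (fun j : Nat => temp ++ pvSepJoin ((t :: rest).take (j + 1)) == text) 0 = false := by
        simp [pvSepJoin, h1]
      by_cases h2 : PySem.Chars.isIn (temp ++ ' ' :: t) text = false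
      · have hnone : (List.range (t :: rest).length).find?
            (fun j => temp ++ pvSepJoin ((t :: rest).take (j + 1)) == text) = none := by
          apply List.find?_eq_none.mpr
          intro j _
          simp only [hsep j, beq_iff_eq]
          exact pv_not_append_eq _ _ ((PySem.Chars.isIn_eq_false_iff _ _).mp h2) _
        rw [hnone]
        simp [pvInnerA, h1, h2]
      · have hq : ((fun j : Nat => temp ++ pvSepJoin ((t :: rest).take (j + 1)) == text) ∘ Nat.succ)
            = (fun j : Nat => (temp ++ ' ' :: t) ++ pvSepJoin (rest.take (j + 1)) == text) := by
          funext j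
          simp only [Function.comp_apply, Nat.succ_eq_add_one, hsep (j + 1)]
        have hstep : (List.range (t :: rest).length).find?
              (fun j => temp ++ pvSepJoin ((t :: rest).take (j + 1)) == text)
            = Option.map Nat.succ ((List.range rest.length).find?
                (fun j => (temp ++ ' ' :: t) ++ pvSepJoin (rest.take (j + 1)) == text)) := by
          rw [List.length_cons, List.range_succ_eq_map,
            List.find?_cons_of_neg (by simp [pvSepJoin, h1]), List.find?_map, hq]
        rw [hstep]
        simp only [pvInnerA, if_neg h1, if_neg h2]
        rw [ih (k + 1) (temp ++ ' ' :: t)]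
        cases hf : (List.range rest.length).find?
            (fun j => (temp ++ ' ' :: t) ++ pvSepJoin (rest.take (j + 1)) == text) with
        | none => rfl
        | some j =>
          simp only [Option.map_some, Nat.succ_eq_add_one]
          have h3 : k + 1 + (j : Int) + s + 1 + 1 = k + ((j + 1 : Nat) : Int) + s + 1 + 1 := by
            push_cast; ring
          simp [h3]

theorem pv_find?_eq_some_of_unique {α : Type} (l : List α) (p : α → Bool) (x : α)
    (hu : ∀ a ∈ l, ∀ b ∈ l, p a → p b → a = b) :
    l.find? p = some x ↔ x ∈ l ∧ p x := by
  constructor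
  · intro h
    exact ⟨List.mem_of_find?_eq_some h, List.find?_some h⟩
  · rintro ⟨hx, hpx⟩
    cases hf : l.find? p with
    | none => exact absurd hpx (List.find?_eq_none.mp hf x hx)
    | some y =>
      have := hu y (List.mem_of_find?_eq_some hf) x hx (List.find?_some hf) hpx
      rw [this]

theorem pv_join_cons (x : List Char) (l : List (List Char)) :
    PySem.Chars.join [' '] (x :: l) = x ++ pvSepJoin l := by
  induction l generalizing x with
  | nil => simp [PySem.Chars.join, List.intercalate, pvSepJoin]
  | cons y l ih =>
    simp only [PySem.Chars.join, List.intercalate, List.intersperse_cons₂,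
      List.flatten_cons] at ih ⊢
    simp [ih, pvSepJoin]

theorem pv_sepJoin_length (l : List (List Char)) :
    (pvSepJoin l).length = (l.map (fun t => t.length + 1)).sum := by
  induction l with
  | nil => simp [pvSepJoin]
  | cons t l ih => simp [pvSepJoin] at ih ⊢; omega

theorem pvS_split (toks : List (List Char)) (i e : Nat) (hie : i ≤ e) :
    pvS toks e = pvS toks i + (((toks.drop i).take (e - i)).map (fun t => t.length + 1)).sum := by
  unfold pvS
  rw [show e = i + (e - i) by omega, List.take_add]
  simp

theorem pvS_lt (toks : List (List Char)) (i e : Nat) (hie : i < e) (he : e ≤ toks.length) :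
    pvS toks i < pvS toks e := by
  have hsplit := pvS_split toks i e (Nat.le_of_lt hie)
  have hlen : 1 ≤ ((toks.drop i).take (e - i)).length := by
    simp only [List.length_take, List.length_drop]
    omega
  have hsum : ((toks.drop i).take (e - i)).length
      ≤ (((toks.drop i).take (e - i)).map (fun t => t.length + 1)).sum := by
    generalize (toks.drop i).take (e - i) = l
    induction l with
    | nil => simp
    | cons t l ih => simp at ih ⊢; omega
  omega

theorem pv_enumerate_eq {α : Type} [Inhabited α] :
    ∀ (l : List α) (start : Int), PySem.List.enumerate l start =
      (List.range l.length).map (fun i : Nat => (start + (i : Int), l.getD i default)) := by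
  intro l
  induction l with
  | nil => intro start; simp [PySem.List.enumerate]
  | cons x l ih =>
    intro start
    rw [PySem.List.enumerate, ih (start + 1)]
    simp only [List.length_cons, List.range_succ_eq_map, List.map_cons, List.map_map]
    congr 1
    · simp
    · apply List.map_congr_left
      intro i _
      simp only [Function.comp_apply, Nat.succ_eq_add_one, List.getD_cons_succ]
      have h1 : start + 1 + (i : Int) = start + ((i : Int) + 1) := by ring
      simp [h1]

theorem pvS_cons (t : List Char) (l : List (List Char)) (k : Nat) :
    pvS (t :: l) (k + 1) = (t.length + 1) + pvS l k := by
  simp [pvS]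

theorem pv_lens_foldl (l : List (List Char)) :
    ∀ (acc : List Int) (a : Int),
    (l.foldl (fun P t => P ++ [P.getLast! + (t.length : Int) + 1]) (acc ++ [a]))
      = acc ++ [a] ++ (List.range l.length).map (fun i : Nat => a + (pvS l (i + 1) : Int)) := by
  induction l with
  | nil => intro acc a; simp
  | cons t l ih =>
    intro acc a
    rw [List.foldl_cons]
    have hlast : (acc ++ [a]).getLast! = a := by simp
    rw [hlast, ih (acc ++ [a]) (a + (t.length : Int) + 1)]
    have htail : List.map ((fun i : Nat => a + (pvS (t :: l) (i + 1) : Int)) ∘ Nat.succ)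
        (List.range l.length)
        = List.map (fun i : Nat => (a + (t.length : Int) + 1) + (pvS l (i + 1) : Int))
            (List.range l.length) := by
      apply List.map_congr_left
      intro i _
      simp only [Function.comp_apply, Nat.succ_eq_add_one, pvS_cons]
      push_cast; ring
    have hhead : a + (pvS (t :: l) (0 + 1) : Int) = a + (t.length : Int) + 1 := by
      rw [pvS_cons]
      have : pvS l 0 = 0 := by simp [pvS]
      rw [this]
      push_cast; ring
    rw [List.length_cons, List.range_succ_eq_map, List.map_cons, List.map_map, htail, hhead]
    simp [List.append_assoc]

theorem pvPrefixLens_eq (toks : List (List Char)) :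
    pvPrefixLens toks = (List.range (toks.length + 1)).map (fun i => (pvS toks i : Int)) := by
  rw [pvPrefixLens, show ([0] : List Int) = [] ++ [0] from rfl, pv_lens_foldl]
  rw [List.range_succ_eq_map, List.map_cons, List.map_map]
  simp [Function.comp_def, Nat.succ_eq_add_one]

theorem pv_dict_items (ps : List (Int × Int)) :
    ∀ (d : PySem.Dict Int Int),
    (∀ p ∈ ps, ∀ q ∈ d.items, q.1 ≠ p.2) → ps.Pairwise (fun a b => a.2 ≠ b.2) →
    (ps.foldl (fun d p => PySem.Dict.insert d p.2 p.1) d).items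
      = d.items ++ ps.map (fun p => (p.2, p.1)) := by
  induction ps with
  | nil => intro d _ _; simp
  | cons p ps ih =>
    intro d hfresh hpair
    rw [List.foldl_cons]
    obtain ⟨h1, h2⟩ := List.pairwise_cons.mp hpair
    have hcont : PySem.Dict.contains d p.2 = false := by
      simp only [PySem.Dict.contains, List.any_eq_false]
      intro q hq
      simpa using hfresh p (List.mem_cons_self) q hq
    have hins : (PySem.Dict.insert d p.2 p.1).items = d.items ++ [(p.2, p.1)] := by
      simp [PySem.Dict.insert, hcont]
    have hfresh' : ∀ r ∈ ps, ∀ q ∈ (PySem.Dict.insert d p.2 p.1).items, q.1 ≠ r.2 := by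
      intro r hr q hq
      rw [hins] at hq
      rcases List.mem_append.mp hq with hq | hq
      · exact hfresh r (List.mem_cons_of_mem _ hr) q hq
      · simp only [List.mem_singleton] at hq
        subst hq
        simpa using h1 r hr
    rw [ih (PySem.Dict.insert d p.2 p.1) hfresh' h2, hins]
    simp

theorem pv_get?_idx (toks : List (List Char)) (key : Int) :
    PySem.Dict.get? ((PySem.List.enumerate (pvPrefixLens toks)).foldl
        (fun d p => PySem.Dict.insert d p.2 p.1) (PySem.Dict.mk [])) key
      = Option.map (fun m : Nat => (m : Int))
          ((List.range (toks.length + 1)).find? (fun m => ((pvS toks m : Int) == key))) := by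
  have henum : PySem.List.enumerate (pvPrefixLens toks) 0
      = (List.range (toks.length + 1)).map (fun i : Nat => ((i : Int), (pvS toks i : Int))) := by
    rw [pvPrefixLens_eq, pv_enumerate_eq]
    simp only [List.length_map, List.length_range]
    apply List.map_congr_left
    intro i hi
    rw [PySem.List.getD_map_range _ _ _ _ (List.mem_range.mp hi)]
    simp
  have hpair : ((List.range (toks.length + 1)).map
      (fun i : Nat => ((i : Int), (pvS toks i : Int)))).Pairwise (fun a b => a.2 ≠ b.2) := by
    rw [List.pairwise_map]
    apply List.Pairwise.imp_of_mem ?_ (List.pairwise_lt_range (n := toks.length + 1))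
    intro a b ha hb hab
    have hb' : b ≤ toks.length := by
      have := List.mem_range.mp hb; omega
    have := pvS_lt toks a b hab hb'
    simp only [ne_eq, Nat.cast_inj]
    omega
  have hitems := pv_dict_items
    ((List.range (toks.length + 1)).map (fun i : Nat => ((i : Int), (pvS toks i : Int))))
    (PySem.Dict.mk []) (by intro p _ q hq; simp at hq) hpair
  show PySem.Dict.get? ((PySem.List.enumerate (pvPrefixLens toks) 0).foldl
        (fun d p => PySem.Dict.insert d p.2 p.1) (PySem.Dict.mk [])) key = _
  rw [henum]
  simp only [PySem.Dict.get?, hitems, List.nil_append, List.map_map]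
  rw [List.find?_map, Option.map_map]
  rfl

-- the per-start contribution of A's outer loop equals B's
theorem pv_contrib_eq (textL : List Char) (toks : List (List Char))
    (hmem : textL ∉ toks) (i : Nat) (hi : i < toks.length) :
    (if toks.getD i [] = PySem.Chars.slice textL none (some ((toks.getD i []).length : Int)) then
        pvInnerA textL (i : Int) (PySem.List.slice toks (some ((i : Int) + 1)) none) 0 (toks.getD i [] ++ []) []
      else []) =
    (match PySem.Dict.get?
        ((PySem.List.enumerate (pvPrefixLens toks)).foldl
          (fun d p => PySem.Dict.insert d p.2 p.1) (PySem.Dict.mk []))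
        (PySem.List.pyGetD (pvPrefixLens toks) (i : Int) 0 + (textL.length : Int) + 1) with
     | some e =>
         if PySem.Chars.join [' '] (PySem.List.slice toks (some (i : Int)) (some e)) = textL
         then [((i : Int), e)] else []
     | none => []) := by
  have htok : toks.getD i [] = toks[i] := List.getD_eq_getElem toks [] hi
  have hrest : PySem.List.slice toks (some ((i : Int) + 1)) none = toks.drop (i + 1) := by
    rw [PySem.List.slice_from toks (by positivity),
      show ((i : Int) + 1).toNat = i + 1 by omega]
  have hP : PySem.List.pyGetD (pvPrefixLens toks) (i : Int) 0 = ((pvS toks i : Nat) : Int) := by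
    rw [pvPrefixLens_eq, PySem.List.pyGetD_natCast]
    exact PySem.List.getD_map_range _ _ _ _ (by omega)
  rw [hP, pv_get?_idx]
  set key : Int := ((pvS toks i : Nat) : Int) + (textL.length : Int) + 1 with hkey
  have hJ : ∀ j : Nat, (toks.getD i []) ++ pvSepJoin ((toks.drop (i + 1)).take (j + 1))
      = PySem.Chars.join [' '] ((toks.drop i).take (j + 2)) := by
    intro j
    rw [List.drop_eq_getElem_cons hi, show j + 2 = (j + 1) + 1 from rfl, List.take_succ_cons,
      pv_join_cons, htok]
  have hlen : ∀ e : Nat, i < e → e ≤ toks.length →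
      (PySem.Chars.join [' '] ((toks.drop i).take (e - i))).length + 1 + pvS toks i
        = pvS toks e := by
    intro e h1 h2
    have hdec : (toks.drop i).take (e - i) = toks[i] :: ((toks.drop (i + 1)).take (e - i - 1)) := by
      rw [List.drop_eq_getElem_cons hi, show e - i = (e - i - 1) + 1 by omega, List.take_succ_cons]
      norm_num
    rw [pvS_split toks i e (Nat.le_of_lt h1), hdec, pv_join_cons, List.length_append,
      pv_sepJoin_length]
    simp only [List.map_cons, List.sum_cons]
    omega
  have hslice : PySem.Chars.slice textL none (some (((toks.getD i []).length : Int)))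
      = textL.take (toks.getD i []).length := by
    rw [PySem.Chars.slice_eq_listSlice, PySem.List.slice_to textL (by positivity)]
    simp
  have huniq : ∀ a ∈ List.range (toks.length + 1), ∀ b ∈ List.range (toks.length + 1),
      ((pvS toks a : Nat) : Int) == key → ((pvS toks b : Nat) : Int) == key → a = b := by
    intro a ha b hb hpa hpb
    have ha' := List.mem_range.mp ha
    have hb' := List.mem_range.mp hb
    rw [beq_iff_eq] at hpa hpb
    by_contra hne
    rcases Nat.lt_or_ge a b with h | h
    · have := pvS_lt toks a b h (by omega); omega
    · rcases Nat.lt_or_ge b a with h' | h'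
      · have := pvS_lt toks b a h' (by omega); omega
      · omega
  rw [hslice, hrest, List.append_nil, pvInnerA_eq, List.length_drop]
  cases hA : (List.range (toks.length - (i + 1))).find?
      (fun j => toks.getD i [] ++ pvSepJoin ((toks.drop (i + 1)).take (j + 1)) == textL) with
  | some j =>
    have hjmem := List.mem_range.mp (List.mem_of_find?_eq_some hA)
    have htext : toks.getD i [] ++ pvSepJoin ((toks.drop (i + 1)).take (j + 1)) = textL := by
      have := List.find?_some hA
      simpa using this
    have hpre : toks.getD i [] <+: textL := htext ▸ List.prefix_append _ _
    have hJe : PySem.Chars.join [' '] ((toks.drop i).take ((i + j + 2) - i)) = textL := by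
      rw [show (i + j + 2) - i = j + 2 by omega, ← hJ j, htext]
    have hSe : ((pvS toks (i + j + 2) : Nat) : Int) = key := by
      have h5 := hlen (i + j + 2) (by omega) (by omega)
      have h6 : textL.length
          = (PySem.Chars.join [' '] ((toks.drop i).take ((i + j + 2) - i))).length := by
        rw [hJe]
      rw [hkey]
      omega
    have hfB : (List.range (toks.length + 1)).find?
        (fun m => ((pvS toks m : Nat) : Int) == key) = some (i + j + 2) := by
      apply (pv_find?_eq_some_of_unique _ _ _ huniq).mpr
      exact ⟨List.mem_range.mpr (by omega), by simpa using hSe⟩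
    rw [hfB]
    simp only [Option.map_some]
    rw [PySem.List.slice_natCast toks i (i + j + 2), hJe,
      if_pos (List.prefix_iff_eq_take.mp hpre), if_pos rfl]
    have he2 : (((i + j + 2 : Nat)) : Int) = 0 + (j : Int) + (i : Int) + 1 + 1 := by
      push_cast; ring
    rw [he2]
  | none =>
    have hnoA : ∀ j, j < toks.length - (i + 1) →
        toks.getD i [] ++ pvSepJoin ((toks.drop (i + 1)).take (j + 1)) ≠ textL := by
      intro j hj
      have := List.find?_eq_none.mp hA j (List.mem_range.mpr hj)
      simpa using this
    cases hB : (List.range (toks.length + 1)).find?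
        (fun m => ((pvS toks m : Nat) : Int) == key) with
    | none => simp
    | some e =>
      simp only [Option.map_some]
      have he' := List.mem_range.mp (List.mem_of_find?_eq_some hB)
      have hkeyE : ((pvS toks e : Nat) : Int) = key := by
        simpa using List.find?_some hB
      have hie : i < e := by
        rcases Nat.lt_or_ge i e with hlt | hle
        · exact hlt
        · exfalso
          have hmono : pvS toks e ≤ pvS toks i := by
            rcases Nat.lt_or_ge e i with h | h
            · exact Nat.le_of_lt (pvS_lt toks e i h (by omega))
            · have : e = i := by omega
              rw [this]
          rw [hkey] at hkeyE
          have hL0 : (0 : Int) ≤ (textL.length : Int) := by positivity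
          omega
      by_cases hJe : PySem.Chars.join [' ']
          (PySem.List.slice toks (some (i : Int)) (some ((e : Nat) : Int))) = textL
      · exfalso
        rw [PySem.List.slice_natCast] at hJe
        rcases Nat.lt_or_ge (i + 1) e with h2 | h2
        · apply hnoA (e - i - 2) (by omega)
          rw [hJ (e - i - 2), show (e - i - 2) + 2 = e - i by omega, hJe]
        · have he1 : e = i + 1 := by omega
          have hx : toks[i] = textL := by
            rw [he1, show (i + 1) - i = 0 + 1 by omega] at hJe
            rw [List.drop_eq_getElem_cons hi, List.take_succ_cons, List.take_zero,
              pv_join_cons] at hJe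
            simpa [pvSepJoin] using hJe
          exact hmem (hx ▸ List.getElem_mem hi)
      · simp [hJe]

theorem pv_main (textL : List Char) (toks : List (List Char)) (hmem : PySem.List.index? toks textL = none) :
    (PySem.List.enumerate toks).foldl (fun result p =>
      if p.2 = PySem.Chars.slice textL none (some ((p.2.length : Int))) then
        pvInnerA textL p.1 (PySem.List.slice toks (some (p.1 + 1)) none) 0 (p.2 ++ []) result
      else result) [] = pvScanB textL toks := by
  have hnot : textL ∉ toks := (PySem.List.index?_eq_none_iff toks textL).mp hmem
  have hdef : (default : List Char) = [] := rfl
  -- turn A's foldl into a flatMap of per-start contributions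
  have hstepA : ∀ (acc : List (Int × Int)), ∀ p ∈ PySem.List.enumerate toks 0,
      (if p.2 = PySem.Chars.slice textL none (some ((p.2.length : Int))) then
        pvInnerA textL p.1 (PySem.List.slice toks (some (p.1 + 1)) none) 0 (p.2 ++ []) acc
      else acc)
      = acc ++ (if p.2 = PySem.Chars.slice textL none (some ((p.2.length : Int))) then
        pvInnerA textL p.1 (PySem.List.slice toks (some (p.1 + 1)) none) 0 (p.2 ++ []) []
      else []) := by
    intro acc p _
    split
    · rw [pvInnerA_append]
    · simp
  rw [PySem.List.foldl_congr_mem (PySem.List.enumerate toks) _ _ [] hstepA,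
    PySem.List.foldl_append_eq_flatMap, pv_enumerate_eq toks 0, List.flatMap_map]
  -- turn B's foldl into a flatMap of per-start contributions
  show _ = pvScanB textL toks
  simp only [pvScanB]
  have hstepB : ∀ (acc : List (Int × Int)), ∀ s ∈ PySem.List.pyRange 0 (toks.length : Int),
      (match PySem.Dict.get? ((PySem.List.enumerate (pvPrefixLens toks)).foldl
            (fun d p => PySem.Dict.insert d p.2 p.1) (PySem.Dict.mk []))
          (PySem.List.pyGetD (pvPrefixLens toks) s 0 + (textL.length : Int) + 1) with
        | some e =>
            if PySem.Chars.join [' '] (PySem.List.slice toks (some s) (some e)) = textL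
            then acc ++ [(s, e)] else acc
        | none => acc)
      = acc ++ (match PySem.Dict.get? ((PySem.List.enumerate (pvPrefixLens toks)).foldl
            (fun d p => PySem.Dict.insert d p.2 p.1) (PySem.Dict.mk []))
          (PySem.List.pyGetD (pvPrefixLens toks) s 0 + (textL.length : Int) + 1) with
        | some e =>
            if PySem.Chars.join [' '] (PySem.List.slice toks (some s) (some e)) = textL
            then [(s, e)] else []
        | none => []) := by
    intro acc s _
    cases PySem.Dict.get? ((PySem.List.enumerate (pvPrefixLens toks)).foldl
        (fun d p => PySem.Dict.insert d p.2 p.1) (PySem.Dict.mk []))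
        (PySem.List.pyGetD (pvPrefixLens toks) s 0 + (textL.length : Int) + 1) with
    | none => simp
    | some e =>
      by_cases h : PySem.Chars.join [' '] (PySem.List.slice toks (some s) (some e)) = textL <;>
        simp [h]
  rw [PySem.List.foldl_congr_mem (PySem.List.pyRange 0 (toks.length : Int)) _ _ [] hstepB,
    PySem.List.foldl_append_eq_flatMap, PySem.List.pyRange_zero_natCast, List.flatMap_map]
  simp only [List.nil_append]
  apply List.flatMap_congr
  intro i hi
  simp only [zero_add, hdef]
  exact pv_contrib_eq textL toks hnot i (List.mem_range.mp hi)

-- ===== VERDICT (by name: the statement is the Claim_ definition above) =====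
theorem match_entities_spec : Claim_equal_match_entities := by
  intro text tokens _
  show match_entities text tokens = match_entities_alt text tokens
  simp only [match_entities, match_entities_alt]
  cases h : PySem.List.index? (tokens.map String.toList) text.toList with
  | some i => rfl
  | none => exact pv_main text.toList (tokens.map String.toList) h
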